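-- pv_equiv track=rewrite | github.com/jobo3208/nvim-mysql | rplugin/python3/nvim_mysql/util.py | get_queries_in_range
-- ===== SOURCE A (Python) =====
-- import itertools
--
-- def get_queries_in_range(buffer, start_row, end_row):
--     r"""Return a list of queries in the given range.
--
--     The list will include queries that are partially in the range.
--
--     >>> buf = ['', 'select count(*) from blah;', '', 'update bloo', 'set a = 1;', '', '']
--     >>> get_queries_in_range(buf, 0, 0)
--     []
--     >>> get_queries_in_range(buf, 1, 1)
--     ['select count(*) from blah;']
--     >>> get_queries_in_range(buf, 0, 2)
--     ['select count(*) from blah;']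
--     >>> get_queries_in_range(buf, 0, 3)
--     ['select count(*) from blah;', 'update bloo\nset a = 1;']
--     >>> get_queries_in_range(buf, 1, 4)
--     ['select count(*) from blah;', 'update bloo\nset a = 1;']
--     >>> get_queries_in_range(buf, 4, 6)
--     ['update bloo\nset a = 1;']
--     >>> get_queries_in_range(buf, 5, 6)
--     []
--     """
--     if buffer[start_row].strip():
--         before = list(reversed(list(itertools.takewhile(bool, reversed(buffer[:start_row])))))
--     else:
--         before = []
--     if buffer[end_row].strip():
--         after = list(itertools.takewhile(bool, buffer[end_row:]))
--     else:
--         after = []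
--
--     queries = []
--     query = ''
--     for line in before + buffer[start_row:end_row] + after:
--         if line.strip():
--             if query:
--                 query += '\n'
--             query += line
--         elif query:
--             queries.append(query)
--             query = ''
--     if query:
--         queries.append(query)
--
--     return queries
-- ===== SOURCE B (Python) =====
-- def get_queries_in_range(buffer, start_row, end_row):
--     """Return a list of queries in the given range (index/cut-point formulation)."""
--     n = len(buffer)
--     s = start_row + n if start_row < 0 else start_row
--     e = end_row + n if end_row < 0 else end_row
--     lo = s
--     if buffer[s].strip():
--         while lo > 0 and buffer[lo - 1]:
--             lo -= 1
--     hi = e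
--     if buffer[e].strip():
--         while hi < n and buffer[hi]:
--             hi += 1
--     lines = buffer[lo:s] + buffer[s:e] + buffer[e:hi]
--     blanks = [i for i, l in enumerate(lines) if not l.strip()]
--     cuts = [-1] + blanks + [len(lines)]
--     return ['\n'.join(lines[a + 1:b]) for a, b in zip(cuts, cuts[1:]) if a + 1 < b]
-- ===== Notes on version B (the rewrite author's own statement) =====
-- stated objective: alternative
-- what changed: The takewhile/reversed range extension is replaced by integer index scans computing cut positions lo/hi into the buffer, and the accumulate-and-flush loop is replaced by computing the blank-line positions once and slicing the lines between consecutive cut points, joining each slice with '\n'.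
import Mathlib
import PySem

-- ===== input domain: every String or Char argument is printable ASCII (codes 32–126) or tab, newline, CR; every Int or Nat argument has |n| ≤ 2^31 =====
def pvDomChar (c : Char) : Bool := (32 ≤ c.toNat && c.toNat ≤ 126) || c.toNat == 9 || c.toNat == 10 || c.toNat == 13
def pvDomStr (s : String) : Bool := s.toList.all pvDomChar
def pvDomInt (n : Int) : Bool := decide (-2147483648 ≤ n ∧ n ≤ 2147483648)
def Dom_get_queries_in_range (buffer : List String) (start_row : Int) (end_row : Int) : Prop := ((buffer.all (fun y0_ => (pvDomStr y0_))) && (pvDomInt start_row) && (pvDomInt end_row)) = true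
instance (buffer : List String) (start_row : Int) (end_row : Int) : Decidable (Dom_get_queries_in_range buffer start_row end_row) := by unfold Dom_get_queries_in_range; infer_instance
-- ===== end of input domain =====

-- B replaces A's takewhile/reversed range extension by integer index scans (lo/hi cut
-- positions into the buffer) and replaces the accumulate-and-flush loop by computing the
-- blank-line positions once and slicing the lines between consecutive cut points (alternative).

-- ===== PORT A =====
def get_queries_in_range (buffer : List String) (start_row : Int) (end_row : Int) : List String :=
  let before : List String :=
    if PySem.Str.strip (PySem.List.pyGetD buffer start_row "") ≠ "" then
      ((PySem.List.slice buffer none (some start_row)).reverse.takeWhile (fun l => l != "")).reverse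
    else []
  let after : List String :=
    if PySem.Str.strip (PySem.List.pyGetD buffer end_row "") ≠ "" then
      (PySem.List.slice buffer (some end_row) none).takeWhile (fun l => l != "")
    else []
  let res :=
    (before ++ PySem.List.slice buffer (some start_row) (some end_row) ++ after).foldl
      (fun st line =>
        if PySem.Str.strip line ≠ "" then
          (st.1, (if st.2 ≠ "" then st.2 ++ "\n" else st.2) ++ line)
        else if st.2 ≠ "" then (st.1 ++ [st.2], "")
        else st)
      ([], "")
  if res.2 ≠ "" then res.1 ++ [res.2] else res.1

-- ===== PORT B =====
-- the backward while loop: 'while lo > 0 and buffer[lo - 1]: lo -= 1'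
def pvScanBack (buffer : List String) : Nat → Nat
  | 0 => 0
  | k + 1 => if PySem.List.pyGetD buffer (k : Int) "" ≠ "" then pvScanBack buffer k else k + 1

-- the forward while loop: 'while hi < n and buffer[hi]: hi += 1' (fuel n - hi encodes hi < n)
def pvScanFwd (buffer : List String) : Nat → Nat → Nat
  | 0, hi => hi
  | fuel + 1, hi => if PySem.List.pyGetD buffer (hi : Int) "" ≠ "" then pvScanFwd buffer fuel (hi + 1) else hi

-- 'blanks = [i for i, l in enumerate(lines) if not l.strip()]'
def pvBlankIdx (lines : List String) : List Int :=
  (PySem.List.enumerate lines).filterMap (fun p => if PySem.Str.strip p.2 == "" then some p.1 else none)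

-- the last three lines of B: cut points and slices between consecutive cuts
def pvPieces (lines : List String) : List String :=
  let cuts : List Int := -1 :: (pvBlankIdx lines ++ [PySem.List.len lines])
  ((cuts.zip cuts.tail).filter (fun p => p.1 + 1 < p.2)).map
    (fun p => PySem.Str.join "\n" (PySem.List.slice lines (some (p.1 + 1)) (some p.2)))

def get_queries_in_range_alt (buffer : List String) (start_row : Int) (end_row : Int) : List String :=
  let n : Int := PySem.List.len buffer
  let s : Int := if start_row < 0 then start_row + n else start_row
  let e : Int := if end_row < 0 then end_row + n else end_row
  let lo : Int :=
    if PySem.Str.strip (PySem.List.pyGetD buffer s "") ≠ "" then (pvScanBack buffer s.toNat : Int) else s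
  let hi : Int :=
    if PySem.Str.strip (PySem.List.pyGetD buffer e "") ≠ "" then
      (pvScanFwd buffer (buffer.length - e.toNat) e.toNat : Int)
    else e
  pvPieces (PySem.List.slice buffer (some lo) (some s) ++ PySem.List.slice buffer (some s) (some e)
    ++ PySem.List.slice buffer (some e) (some hi))

-- ===== PRECONDITION & SPEC =====
-- Pre_ excludes exactly the inputs where buffer[start_row] or buffer[end_row] raises IndexError.
def Pre_get_queries_in_range (buffer : List String) (start_row : Int) (end_row : Int) : Prop :=
  PySem.Raise.InRange buffer.length start_row ∧ PySem.Raise.InRange buffer.length end_row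
instance (buffer : List String) (start_row : Int) (end_row : Int) : Decidable (Pre_get_queries_in_range buffer start_row end_row) := by unfold Pre_get_queries_in_range; infer_instance

def pvWitness_get_queries_in_range : List String × Int × Int := (["select 1;", "", "x"], 0, 2)

def Spec_get_queries_in_range (buffer : List String) (start_row : Int) (end_row : Int) (out : List String) : Prop := out = get_queries_in_range_alt buffer start_row end_row
instance (buffer : List String) (start_row : Int) (end_row : Int) (out : List String) : Decidable (Spec_get_queries_in_range buffer start_row end_row out) := by unfold Spec_get_queries_in_range; infer_instance

-- ===== CLAIM (what is proved, stated in full; the proofs are below) =====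
def Claim_equal_get_queries_in_range : Prop := ∀ (buffer : List String) (start_row : Int) (end_row : Int), Dom_get_queries_in_range buffer start_row end_row → Pre_get_queries_in_range buffer start_row end_row → Spec_get_queries_in_range buffer start_row end_row (get_queries_in_range buffer start_row end_row)

-- ===== LEMMAS AND PROOFS =====

-- blank l = "not bool(l.strip())"
def pvBlank (l : String) : Bool := PySem.Str.strip l == ""

-- A's run grouping, the common middle ground of the two programs
def pvRuns : List String → List (List String)
  | [] => []
  | l :: ls =>
    if pvBlank l then pvRuns ls
    else (l :: ls.takeWhile (fun x => !pvBlank x)) :: pvRuns (ls.dropWhile (fun x => !pvBlank x))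
  termination_by xs => xs.length
  decreasing_by
    all_goals have := List.length_dropWhile_le (fun x => !pvBlank x) ls
    all_goals simp
    omega

-- A's loop body and finalization, abbreviated for the proofs
def pvStep (st : List String × String) (line : String) : List String × String :=
  if PySem.Str.strip line ≠ "" then
    (st.1, (if st.2 ≠ "" then st.2 ++ "\n" else st.2) ++ line)
  else if st.2 ≠ "" then (st.1 ++ [st.2], "")
  else st

def pvFin (st : List String × String) : List String :=
  if st.2 ≠ "" then st.1 ++ [st.2] else st.1

theorem pvBlank_empty : pvBlank "" = true := by decide

theorem ne_empty_of_nonblank {l : String} (h : pvBlank l = false) : l ≠ "" := by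
  intro he; subst he; exact absurd pvBlank_empty (by simp [h])

theorem append_nl_ne_empty (s t : String) : s ++ "\n" ++ t ≠ "" := by
  intro h
  have h1 : (s ++ "\n" ++ t).length = ("" : String).length := by rw [h]
  simp [String.length_append] at h1

-- folding "acc ++ '\n' ++ b" distributes over a left prefix
theorem foldl_join_prefix (rs : List String) : ∀ (p x : String),
    List.foldl (fun a b => a ++ "\n" ++ b) (p ++ x) rs
      = p ++ List.foldl (fun a b => a ++ "\n" ++ b) x rs := by
  induction rs with
  | nil => intro p x; rfl
  | cons b rs ih =>
    intro p x
    simp only [List.foldl_cons]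
    rw [String.append_assoc, String.append_assoc, ih p (x ++ ("\n" ++ b)),
      String.append_assoc (s₁ := x) (s₂ := "\n") (s₃ := b)]

-- '\n'.join of a nonempty list as A's left fold
theorem join_eq_foldl (run : List String) : ∀ (l : String),
    PySem.Str.join "\n" (l :: run) = List.foldl (fun a b => a ++ "\n" ++ b) l run := by
  induction run with
  | nil => intro l; simp [PySem.Str.join, PySem.Chars.join, List.intercalate]
  | cons b rs ih =>
    intro l
    have h2 : PySem.Str.join "\n" (l :: b :: rs) = l ++ "\n" ++ PySem.Str.join "\n" (b :: rs) := by
      apply String.toList_injective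
      simp [PySem.Str.toList_join, PySem.Chars.join_cons_cons]
    rw [h2, ih b, List.foldl_cons]
    rw [show l ++ "\n" ++ List.foldl (fun a b => a ++ "\n" ++ b) b rs
          = (l ++ "\n") ++ List.foldl (fun a b => a ++ "\n" ++ b) b rs from by
        simp [String.append_assoc]]
    rw [foldl_join_prefix rs (l ++ "\n") b]

-- the A-side invariant: A's loop over any line list equals run grouping
theorem pvMain (lines : List String) :
    (∀ qs : List String,
        pvFin (List.foldl pvStep (qs, "") lines) = qs ++ (pvRuns lines).map (PySem.Str.join "\n"))
    ∧ (∀ (qs : List String) (q : String), q ≠ "" →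
        pvFin (List.foldl pvStep (qs, q) lines)
          = qs ++ [List.foldl (fun a b => a ++ "\n" ++ b) q (lines.takeWhile (fun x => !pvBlank x))]
              ++ (pvRuns (lines.dropWhile (fun x => !pvBlank x))).map (PySem.Str.join "\n")) := by
  induction lines with
  | nil =>
    constructor
    · intro qs; simp [pvFin, pvRuns]
    · intro qs q hq; simp [pvFin, pvRuns, hq]
  | cons l ls ih =>
    constructor
    · intro qs
      by_cases hb : pvBlank l = true
      · have hs : PySem.Str.strip l = "" := by simpa [pvBlank] using hb
        rw [List.foldl_cons, show pvStep (qs, "") l = (qs, "") from by simp [pvStep, hs]]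
        rw [ih.1 qs, show pvRuns (l :: ls) = pvRuns ls from by rw [pvRuns]; simp [hb]]
      · have hb' : pvBlank l = false := by simpa using hb
        have hs : PySem.Str.strip l ≠ "" := by simpa [pvBlank] using hb'
        have hl : l ≠ "" := ne_empty_of_nonblank hb'
        rw [List.foldl_cons, show pvStep (qs, "") l = (qs, l) from by simp [pvStep, hs]]
        rw [ih.2 qs l hl]
        rw [show pvRuns (l :: ls)
              = (l :: ls.takeWhile (fun x => !pvBlank x))
                  :: pvRuns (ls.dropWhile (fun x => !pvBlank x)) from by rw [pvRuns]; simp [hb']]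
        rw [List.map_cons, join_eq_foldl _ l]
        simp
    · intro qs q hq
      by_cases hb : pvBlank l = true
      · have hs : PySem.Str.strip l = "" := by simpa [pvBlank] using hb
        rw [List.foldl_cons, show pvStep (qs, q) l = (qs ++ [q], "") from by simp [pvStep, hs, hq]]
        have hrw : pvRuns (l :: ls) = pvRuns ls := by rw [pvRuns]; simp [hb]
        rw [ih.1 (qs ++ [q]), List.takeWhile_cons, List.dropWhile_cons]
        simp [hb, hrw]
      · have hb' : pvBlank l = false := by simpa using hb
        have hs : PySem.Str.strip l ≠ "" := by simpa [pvBlank] using hb'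
        have hq' : q ++ "\n" ++ l ≠ "" := append_nl_ne_empty q l
        rw [List.foldl_cons,
          show pvStep (qs, q) l = (qs, q ++ "\n" ++ l) from by simp [pvStep, hs, hq]]
        rw [ih.2 qs (q ++ "\n" ++ l) hq']
        simp [List.takeWhile, List.dropWhile, hb']

-- ---- B-side lemmas ----

theorem pvScanBack_le (buffer : List String) : ∀ k, pvScanBack buffer k ≤ k := by
  intro k
  induction k with
  | zero => simp [pvScanBack]
  | succ k ih => rw [pvScanBack]; split <;> omega

-- the backward scan computes A's reversed takewhile region
theorem pvBack_eq (buffer : List String) : ∀ k, k ≤ buffer.length →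
    ((buffer.take k).reverse.takeWhile (fun l => l != "")).reverse
      = (buffer.take k).drop (pvScanBack buffer k) := by
  intro k
  induction k with
  | zero => simp [pvScanBack]
  | succ k ih =>
    intro hk
    have hklt : k < buffer.length := by omega
    have htake : buffer.take (k + 1) = buffer.take k ++ [buffer[k]] :=
      List.take_succ_eq_append_getElem hklt
    have hget : PySem.List.pyGetD buffer (k : Int) "" = buffer[k] :=
      PySem.List.pyGetD_ofNat buffer k "" hklt
    rw [pvScanBack, hget, htake]
    by_cases hb : buffer[k] = ""
    · simp [hb]
    · have hlen : pvScanBack buffer k ≤ (buffer.take k).length := by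
        simp [List.length_take]
        have := pvScanBack_le buffer k; omega
      simp only [if_pos hb, List.reverse_append, List.reverse_cons, List.reverse_nil,
        List.nil_append, List.cons_append, List.takeWhile_cons]
      rw [if_pos (by simpa using hb)]
      rw [List.reverse_cons, ih (by omega), List.drop_append_of_le_length hlen]

theorem le_pvScanFwd (buffer : List String) : ∀ fuel j, j ≤ pvScanFwd buffer fuel j := by
  intro fuel
  induction fuel with
  | zero => intro j; simp [pvScanFwd]
  | succ fuel ih =>
    intro j
    rw [pvScanFwd]
    split
    · exact le_trans (by omega) (ih (j + 1))
    · exact le_refl j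

-- the forward scan computes A's takewhile region
theorem pvFwd_eq (buffer : List String) : ∀ fuel j, j + fuel = buffer.length →
    (buffer.drop j).takeWhile (fun l => l != "")
      = (buffer.drop j).take (pvScanFwd buffer fuel j - j) := by
  intro fuel
  induction fuel with
  | zero =>
    intro j hj
    rw [List.drop_eq_nil_of_le (by omega)]
    simp
  | succ fuel ih =>
    intro j hj
    have hjlt : j < buffer.length := by omega
    have hdrop : buffer.drop j = buffer[j] :: buffer.drop (j + 1) :=
      List.drop_eq_getElem_cons hjlt
    have hget : PySem.List.pyGetD buffer (j : Int) "" = buffer[j] :=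
      PySem.List.pyGetD_ofNat buffer j "" hjlt
    rw [pvScanFwd, hget, hdrop]
    by_cases hb : buffer[j] = ""
    · simp [hb]
    · have hle : j + 1 ≤ pvScanFwd buffer fuel (j + 1) := le_pvScanFwd buffer fuel (j + 1)
      simp only [List.takeWhile_cons, if_pos (by simpa using hb)]
      rw [show pvScanFwd buffer fuel (j + 1) - j = (pvScanFwd buffer fuel (j + 1) - (j + 1)) + 1
            from by omega]
      rw [List.take_succ_cons, ih (j + 1) (by omega)]
      simp [hb]

-- normalization of a possibly negative in-range index (indexing)
theorem pvGetD_norm (buffer : List String) (i : Int) (h : PySem.Raise.InRange buffer.length i)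
    (hneg : i < 0) : PySem.List.pyGetD buffer i "" = PySem.List.pyGetD buffer (i + buffer.length) "" := by
  have hr : -(buffer.length : Int) ≤ i := by
    unfold PySem.Raise.InRange at h
    omega
  have hk : i = -(((-i).toNat : Nat) : Int) := by omega
  rw [hk, PySem.List.pyGetD_neg_natCast buffer (-i).toNat "" (by omega) (by omega)]
  have h2 : (-(((-i).toNat : Nat) : Int) + (buffer.length : Int)) = ((buffer.length - (-i).toNat : Nat) : Int) := by
    omega
  rw [h2, PySem.List.pyGetD_natCast]
  rw [List.getD_eq_getElem _ _ (by omega)]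

-- ===== the cut-point grouping equals run grouping =====

-- every blank index is in [0, len)
theorem pvBlankIdx_mem (lines : List String) {x : Int} (hx : x ∈ pvBlankIdx lines) :
    0 ≤ x ∧ x < (lines.length : Int) := by
  obtain ⟨p, hp, hpx⟩ := List.mem_filterMap.mp hx
  obtain ⟨k, hk, rfl⟩ := (PySem.List.mem_enumerate_iff lines 0 p).mp hp
  split at hpx
  · simp only [Option.some.injEq] at hpx
    subst hpx
    constructor <;> omega
  · exact absurd hpx (by simp)

-- blanks of an all-nonblank list are empty
theorem pvBlankIdx_nil_of_nonblank (lines : List String)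
    (h : ∀ l ∈ lines, pvBlank l = false) : ∀ s, (PySem.List.enumerate lines s).filterMap
      (fun p => if PySem.Str.strip p.2 == "" then some p.1 else none) = [] := by
  induction lines with
  | nil => intro s; simp [PySem.List.enumerate_nil]
  | cons l ls ih =>
    intro s
    rw [PySem.List.enumerate_cons, List.filterMap_cons]
    have hl : (PySem.Str.strip l == "") = false := by
      have := h l (by simp); simpa [pvBlank] using this
    simp only [hl]
    exact ih (fun x hx => h x (by simp [hx])) (s + 1)

-- shift of the blank-index comprehension
theorem pvEnum_shift (lines : List String) : ∀ (s t : Int),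
    (PySem.List.enumerate lines (s + t)).filterMap
        (fun p => if PySem.Str.strip p.2 == "" then some p.1 else none)
      = ((PySem.List.enumerate lines s).filterMap
          (fun p => if PySem.Str.strip p.2 == "" then some p.1 else none)).map (· + t) := by
  induction lines with
  | nil => intro s t; simp [PySem.List.enumerate_nil]
  | cons l ls ih =>
    intro s t
    rw [PySem.List.enumerate_cons, PySem.List.enumerate_cons, List.filterMap_cons,
      List.filterMap_cons]
    have hst : s + t + 1 = (s + 1) + t := by ring
    by_cases hb : (PySem.Str.strip l == "") = true
    · rw [if_pos hb, if_pos hb, hst, ih (s + 1) t, List.map_cons]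
    · rw [if_neg hb, if_neg hb, hst, ih (s + 1) t]

-- slice past a prefix
theorem pvSlice_shift (pre suf : List String) (x y : Int) (hx : 0 ≤ x) (hy : 0 ≤ y) :
    PySem.List.slice (pre ++ suf) (some (x + pre.length)) (some (y + pre.length))
      = PySem.List.slice suf (some x) (some y) := by
  rw [PySem.List.slice_toNat _ (by omega) (by omega), PySem.List.slice_toNat _ hx hy]
  have h1 : (x + (pre.length : Int)).toNat = x.toNat + pre.length := by omega
  have h2 : (y + (pre.length : Int)).toNat = y.toNat + pre.length := by omega
  rw [h1, h2, show x.toNat + pre.length = pre.length + x.toNat from by omega,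
    ← List.drop_drop, List.drop_left]
  congr 1
  omega

-- the generic piece list over a cut list
def pvP (lines : List String) (cuts : List Int) : List String :=
  ((cuts.zip cuts.tail).filter (fun p => p.1 + 1 < p.2)).map
    (fun p => PySem.Str.join "\n" (PySem.List.slice lines (some (p.1 + 1)) (some p.2)))

theorem pvP_shift (pre suf : List String) (cuts : List Int)
    (hcuts : ∀ c ∈ cuts, -1 ≤ c) :
    pvP (pre ++ suf) (cuts.map (· + (pre.length : Int))) = pvP suf cuts := by
  unfold pvP
  have htail : (cuts.map (· + (pre.length : Int))).tail = cuts.tail.map (· + (pre.length : Int)) := by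
    cases cuts <;> simp
  rw [htail, List.zip_map, List.filter_map, List.map_map]
  have hpred : ∀ p ∈ cuts.zip cuts.tail,
      ((fun p : Int × Int => decide (p.1 + 1 < p.2)) ∘ Prod.map (· + (pre.length : Int)) (· + (pre.length : Int))) p
        = (fun p : Int × Int => decide (p.1 + 1 < p.2)) p := by
    intro p _; simp [Prod.map]; constructor <;> intro h <;> omega
  rw [List.filter_congr hpred]
  apply List.map_congr_left
  intro p hp
  have hmem := List.of_mem_zip (List.mem_filter.mp hp).1
  have hlt : p.1 + 1 < p.2 := by
    have := (List.mem_filter.mp hp).2; simpa using this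
  have h1 : -1 ≤ p.1 := hcuts p.1 hmem.1
  simp only [Function.comp, Prod.map]
  rw [show p.1 + (pre.length : Int) + 1 = (p.1 + 1) + (pre.length : Int) from by ring,
    pvSlice_shift pre suf (p.1 + 1) p.2 (by omega) (by omega)]

-- cut list of lines, and its decomposition at the first blank line
def pvCuts (lines : List String) : List Int := -1 :: (pvBlankIdx lines ++ [PySem.List.len lines])

theorem pvCuts_mem (lines : List String) {c : Int} (hc : c ∈ pvCuts lines) : -1 ≤ c := by
  rcases List.mem_cons.mp hc with h | h
  · omega
  · rcases List.mem_append.mp h with h | h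
    · exact le_of_lt (lt_of_lt_of_le (by norm_num) (pvBlankIdx_mem lines h).1)
    · simp only [List.mem_singleton] at h
      rw [h, PySem.List.len_eq]
      omega

theorem pvCuts_decomp (p : List String) (bl : String) (suf : List String)
    (hp : ∀ l ∈ p, pvBlank l = false) (hbl : pvBlank bl = true) :
    pvCuts (p ++ bl :: suf) = -1 :: (pvCuts suf).map (· + ((p.length : Int) + 1)) := by
  have hb' : (PySem.Str.strip bl == "") = true := by simpa [pvBlank] using hbl
  have henum : pvBlankIdx (p ++ bl :: suf)
      = (p.length : Int) :: (pvBlankIdx suf).map (· + ((p.length : Int) + 1)) := by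
    unfold pvBlankIdx
    rw [PySem.List.enumerate_append, List.filterMap_append,
      pvBlankIdx_nil_of_nonblank p hp 0, List.nil_append,
      PySem.List.enumerate_cons, List.filterMap_cons, if_pos hb']
    rw [show (0 : Int) + (p.length : Int) + 1 = 0 + ((p.length : Int) + 1) from by ring,
      pvEnum_shift suf 0 ((p.length : Int) + 1)]
    simp
  have hlen' : PySem.List.len (p ++ bl :: suf) = PySem.List.len suf + ((p.length : Int) + 1) := by
    simp only [PySem.List.len_eq, List.length_append, List.length_cons]
    push_cast
    ring
  unfold pvCuts
  rw [henum, hlen']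
  simp only [List.map_cons, List.map_append, List.map_nil, List.cons_append, List.cons.injEq]
  exact ⟨trivial, by omega, trivial⟩

-- peeling one cut point off the generic piece list
theorem pvP_cons (lines : List String) (c0 : Int) (rest : List Int) :
    pvP lines (c0 :: rest)
      = (match rest.head? with
         | some h => if c0 + 1 < h then
             [PySem.Str.join "\n" (PySem.List.slice lines (some (c0 + 1)) (some h))] else []
         | none => []) ++ pvP lines rest := by
  cases rest with
  | nil => simp [pvP]
  | cons d rest' =>
    simp only [pvP, List.tail_cons, List.zip_cons_cons, List.filter_cons, List.head?_cons]
    split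
    · simp_all
    · simp_all

-- one decomposition step: pieces of (nonblank prefix ++ blank ++ suffix)
theorem pvStepLemma (p : List String) (bl : String) (suf : List String)
    (hp : ∀ l ∈ p, pvBlank l = false) (hbl : pvBlank bl = true)
    (ih : pvP suf (pvCuts suf) = (pvRuns suf).map (PySem.Str.join "\n")) :
    pvP (p ++ bl :: suf) (pvCuts (p ++ bl :: suf))
      = (pvRuns (p ++ bl :: suf)).map (PySem.Str.join "\n") := by
  have hshift : pvP (p ++ bl :: suf) ((pvCuts suf).map (· + ((p.length : Int) + 1)))
      = pvP suf (pvCuts suf) := by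
    have := pvP_shift (p ++ [bl]) suf (pvCuts suf) (fun c hc => pvCuts_mem suf hc)
    simpa [show ((p ++ [bl]).length : Int) = (p.length : Int) + 1 from by simp]
      using this
  have hmapcuts : (pvCuts suf).map (· + ((p.length : Int) + 1))
      = (p.length : Int) :: ((pvBlankIdx suf ++ [PySem.List.len suf]).map (· + ((p.length : Int) + 1))) := by
    unfold pvCuts
    rw [List.map_cons]
    congr 1
    omega
  have hruns : pvRuns (p ++ bl :: suf) = (if p = [] then [] else [p]) ++ pvRuns suf := by
    cases p with
    | nil =>
      rw [List.nil_append, pvRuns, if_pos hbl]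
      simp
    | cons l p' =>
      have hl : pvBlank l = false := hp l (by simp)
      have hp' : ∀ x ∈ p', pvBlank x = false := fun x hx => hp x (by simp [hx])
      rw [List.cons_append, pvRuns, if_neg (by simp [hl])]
      have ht : (p' ++ bl :: suf).takeWhile (fun x => !pvBlank x) = p' := by
        rw [List.takeWhile_append]
        split
        · simp [hbl]
        · rename_i hfail
          exact absurd (congrArg List.length
            (List.takeWhile_eq_self_iff.mpr (by intro a ha; simp [hp' a ha]))) hfail
      have hd : (p' ++ bl :: suf).dropWhile (fun x => !pvBlank x) = bl :: suf := by
        have h3 := List.takeWhile_append_dropWhile (p := fun x => !pvBlank x) (l := p' ++ bl :: suf)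
        rw [ht] at h3
        exact List.append_cancel_left h3
      rw [ht, hd, show pvRuns (bl :: suf) = pvRuns suf from by rw [pvRuns, if_pos hbl]]
      simp
  have hh : ((pvCuts suf).map (· + ((p.length : Int) + 1))).head? = some (p.length : Int) := by
    rw [hmapcuts]
    rfl
  rw [pvCuts_decomp p bl suf hp hbl, pvP_cons, hh, hshift, ih, hruns]
  by_cases hpe : p = []
  · subst hpe
    simp
  · have hplen : 0 < p.length := List.length_pos_iff.mpr hpe
    have hslice : PySem.List.slice (p ++ bl :: suf) (some (-1 + 1)) (some (p.length : Int)) = p := by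
      rw [show (-1 + 1 : Int) = ((0 : Nat) : Int) from by norm_num,
        PySem.List.slice_natCast]
      simp
    simp only [if_pos (show (-1 : Int) + 1 < (p.length : Int) from by omega), hslice]
    simp [hpe]

-- the master lemma: the cut-point pieces are the joined runs
theorem pvMaster (lines : List String) :
    pvP lines (pvCuts lines) = (pvRuns lines).map (PySem.Str.join "\n") := by
  by_cases hex : ∃ bl ∈ lines, pvBlank bl = true
  · have hrest : lines.dropWhile (fun x => !pvBlank x) ≠ [] := by
      intro hnil
      obtain ⟨bl, hbl, hblb⟩ := hex
      have := List.dropWhile_eq_nil_iff.mp hnil bl hbl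
      simp [hblb] at this
    obtain ⟨bl, suf, hbs⟩ := List.exists_cons_of_ne_nil hrest
    have hbl : pvBlank bl = true := by
      have h5 := List.head_dropWhile_not (fun x => !pvBlank x) (l := lines) hrest
      simp only [hbs, List.head_cons] at h5
      simpa using h5
    have hp : ∀ l ∈ lines.takeWhile (fun x => !pvBlank x), pvBlank l = false := by
      intro l hl
      simpa using List.mem_takeWhile_imp hl
    have hsplit : lines = lines.takeWhile (fun x => !pvBlank x) ++ bl :: suf := by
      conv_lhs => rw [← List.takeWhile_append_dropWhile (p := fun x => !pvBlank x) (l := lines)]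
      rw [hbs]
    have hlen : suf.length < lines.length := by
      conv_rhs => rw [hsplit]
      simp
      omega
    rw [hsplit]
    exact pvStepLemma _ bl suf hp hbl (pvMaster suf)
  · have hex' : ∀ bl ∈ lines, ¬ pvBlank bl = true := by
      intro bl hbl hb
      exact hex ⟨bl, hbl, hb⟩
    have hnb : ∀ l ∈ lines, pvBlank l = false := by
      intro l hl
      have := hex' l hl
      simpa using this
    have hblanks : pvBlankIdx lines = [] := pvBlankIdx_nil_of_nonblank lines hnb 0
    cases lines with
    | nil =>
      rw [show pvRuns ([] : List String) = [] from by rw [pvRuns]]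
      simp [pvP, pvCuts, pvBlankIdx, PySem.List.enumerate_nil, PySem.List.len]
    | cons l ls =>
      have hls : ∀ x ∈ ls, pvBlank x = false := fun x hx => hnb x (by simp [hx])
      have hruns : pvRuns (l :: ls) = [l :: ls] := by
        rw [pvRuns, if_neg (by simp [hnb l (by simp)])]
        rw [List.takeWhile_eq_self_iff.mpr (by intro a ha; simp [hls a ha]),
          List.dropWhile_eq_nil_iff.mpr (by intro a ha; simp [hls a ha])]
        rw [pvRuns]
      rw [hruns]
      unfold pvP pvCuts
      rw [hblanks]
      have hslice : PySem.List.slice (l :: ls) (some (-1 + 1)) (some (PySem.List.len (l :: ls))) = l :: ls := by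
        rw [show (-1 + 1 : Int) = ((0 : Nat) : Int) from by norm_num, PySem.List.len_eq,
          PySem.List.slice_natCast]
        simp
      simp only [List.nil_append, List.tail_cons, List.zip_cons_cons, List.zip_nil_right,
        List.filter_cons, List.filter_nil]
      rw [if_pos (by simp [PySem.List.len_eq])]
      rw [List.map_cons, List.map_nil, hslice]
      simp
  termination_by lines.length
  decreasing_by exact hlen

-- ===== VERDICT (by name: the statement is the Claim_ definition above) =====
theorem get_queries_in_range_spec : Claim_equal_get_queries_in_range := by
  intro buffer start_row end_row _hdom hpre
  obtain ⟨h1, h2⟩ := hpre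
  unfold PySem.Raise.InRange at h1 h2
  unfold Spec_get_queries_in_range get_queries_in_range get_queries_in_range_alt
  simp only [PySem.List.len_eq]
  set s := (if start_row < 0 then start_row + (buffer.length : Int) else start_row) with hs
  set e := (if end_row < 0 then end_row + (buffer.length : Int) else end_row) with he
  have hsr : 0 ≤ s ∧ s < (buffer.length : Int) := by rw [hs]; split_ifs <;> omega
  have her : 0 ≤ e ∧ e < (buffer.length : Int) := by rw [he]; split_ifs <;> omega
  have hgetS : PySem.List.pyGetD buffer start_row "" = PySem.List.pyGetD buffer s "" := by
    rw [hs]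
    split_ifs with h
    · exact pvGetD_norm buffer start_row ⟨by omega, by omega⟩ h
    · rfl
  have hgetE : PySem.List.pyGetD buffer end_row "" = PySem.List.pyGetD buffer e "" := by
    rw [he]
    split_ifs with h
    · exact pvGetD_norm buffer end_row ⟨by omega, by omega⟩ h
    · rfl
  have htakeS : PySem.List.slice buffer none (some start_row) = buffer.take s.toNat := by
    rw [hs]
    split_ifs with h
    · have hk : start_row = -(((-start_row).toNat : Nat) : Int) := by omega
      rw [hk, PySem.List.slice_to_neg_natCast buffer _ (by omega)]
      congr 1
      omega
    · rw [PySem.List.slice_to buffer (by omega)]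
  have hdropE : PySem.List.slice buffer (some end_row) none = buffer.drop e.toNat := by
    rw [he]
    split_ifs with h
    · have hk : end_row = -(((-end_row).toNat : Nat) : Int) := by omega
      rw [hk, PySem.List.slice_from_neg_natCast buffer _ (by omega)]
      congr 1
      omega
    · rw [PySem.List.slice_from buffer (by omega)]
  have hmid : PySem.List.slice buffer (some start_row) (some end_row)
      = PySem.List.slice buffer (some s) (some e) := by
    unfold PySem.List.slice
    have c1 : PySem.List.clampIdx buffer.length start_row = PySem.List.clampIdx buffer.length s := by
      rw [hs]; unfold PySem.List.clampIdx; split_ifs <;> omega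
    have c2 : PySem.List.clampIdx buffer.length end_row = PySem.List.clampIdx buffer.length e := by
      rw [he]; unfold PySem.List.clampIdx; split_ifs <;> omega
    simp only [c1, c2]
  have hbefore : (if PySem.Str.strip (PySem.List.pyGetD buffer s "") ≠ "" then
        ((PySem.List.slice buffer none (some start_row)).reverse.takeWhile (fun l => l != "")).reverse
      else [])
      = PySem.List.slice buffer
          (some (if PySem.Str.strip (PySem.List.pyGetD buffer s "") ≠ "" then
            ((pvScanBack buffer s.toNat : Nat) : Int) else s)) (some s) := by
    split_ifs with hc
    · rw [htakeS, pvBack_eq buffer s.toNat (by omega)]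
      rw [PySem.List.slice_toNat buffer (by positivity) (by omega)]
      rw [Int.toNat_natCast]
      exact List.drop_take
    · rw [PySem.List.slice_toNat buffer (by omega) (by omega)]
      simp
  have hafter : (if PySem.Str.strip (PySem.List.pyGetD buffer e "") ≠ "" then
        (PySem.List.slice buffer (some end_row) none).takeWhile (fun l => l != "")
      else [])
      = PySem.List.slice buffer (some e)
          (some (if PySem.Str.strip (PySem.List.pyGetD buffer e "") ≠ "" then
            ((pvScanFwd buffer (buffer.length - e.toNat) e.toNat : Nat) : Int) else e)) := by
    split_ifs with hc
    · rw [hdropE, pvFwd_eq buffer (buffer.length - e.toNat) e.toNat (by omega)]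
      rw [PySem.List.slice_toNat buffer (by omega) (by positivity)]
      rw [Int.toNat_natCast]
    · rw [PySem.List.slice_toNat buffer (by omega) (by omega)]
      simp
  rw [hgetS, hgetE, hbefore, hafter, hmid]
  exact ((pvMain _).1 []).trans (pvMaster _).symm
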